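-- pv_equiv track=rewrite | github.com/singularity6033/master_dissertation | utils/anchors.py | get_vgg_output_length
-- ===== SOURCE A (Python) =====
-- import math
--
-- def get_vgg_output_length(height, width, pooling_num=4):
--     def get_output_length(input_length):
--         filter_sizes = [2, 2, 2, 2]
--         padding = [0, 0, 0, 0]
--         stride = 2
--         for i in range(len(filter_sizes[:pooling_num])):
--             input_length = math.floor((input_length + 2 * padding[i] - filter_sizes[i]) // stride + 1)
--         return input_length
--     return get_output_length(height), get_output_length(width)
-- ===== SOURCE B (Python) =====
-- def get_vgg_output_length(height, width, pooling_num=4):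
--     # Each 2x2 stride-2 pooling halves the length (floor), so after n poolings
--     # the length is floor(L / 2**n); VGG has at most 4 pooling layers.
--     n = min(pooling_num, 4)
--     d = 2 ** n
--     return height // d, width // d
-- ===== Notes on version B (the rewrite author's own statement) =====
-- stated objective: simpler
-- what changed: Replaced the per-pooling loop over filter/padding lists with the closed form floor(L / 2**min(pooling_num,4)); Pre_ excludes negative pooling counts, a meaningless input where A's value is an accident of Python slice semantics.
-- outside the precondition, e.g. on get_vgg_output_length(8, 8, -1): A returns (1, 1), B returns (16.0, 16.0)
import Mathlib
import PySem

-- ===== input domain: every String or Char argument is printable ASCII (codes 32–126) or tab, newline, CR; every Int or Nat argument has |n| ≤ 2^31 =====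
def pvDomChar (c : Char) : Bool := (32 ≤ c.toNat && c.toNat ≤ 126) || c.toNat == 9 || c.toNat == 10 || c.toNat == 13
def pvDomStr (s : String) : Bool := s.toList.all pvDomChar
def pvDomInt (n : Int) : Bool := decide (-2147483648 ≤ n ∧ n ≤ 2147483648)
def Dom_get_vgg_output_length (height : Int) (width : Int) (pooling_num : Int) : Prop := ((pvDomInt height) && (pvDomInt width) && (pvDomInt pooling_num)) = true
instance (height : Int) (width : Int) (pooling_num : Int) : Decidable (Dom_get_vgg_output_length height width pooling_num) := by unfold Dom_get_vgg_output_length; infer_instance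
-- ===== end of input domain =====

-- B replaces the pooling loop by the closed form floor(L / 2^min(pooling_num,4)); objective: simpler.

-- ===== PORT A =====
-- inner helper get_output_length; list indices i are always in range of both
-- 4-element lists (i < slice length ≤ 4), so pyGetD with default 0 is exact here.
def get_vgg_output_length (height : Int) (width : Int) (pooling_num : Int) : Int × Int :=
  let get_output_length : Int → Int := fun input_length =>
    let filter_sizes : List Int := [2, 2, 2, 2]
    let padding : List Int := [0, 0, 0, 0]
    let stride : Int := 2
    (PySem.List.pyRange 0 (((PySem.List.slice filter_sizes none (some pooling_num)).length : Int)) 1).foldl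
      (fun L i =>
        -- math.floor of an int is the int itself
        PySem.Int.floordiv (L + 2 * PySem.List.pyGetD padding i 0 - PySem.List.pyGetD filter_sizes i 0) stride + 1)
      input_length
  (get_output_length height, get_output_length width)

-- ===== PORT B =====
def get_vgg_output_length_alt (height : Int) (width : Int) (pooling_num : Int) : Int × Int :=
  let n : Int := min pooling_num 4
  let d : Int := 2 ^ n.toNat
  (PySem.Int.floordiv height d, PySem.Int.floordiv width d)

-- ===== PRECONDITION & SPEC =====
-- Pre_ excludes negative pooling counts, a meaningless input outside the task's
-- natural domain; A still returns a value there, an accident of slice semantics,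
-- while B's 2**n would leave the integers.
def Pre_get_vgg_output_length (height : Int) (width : Int) (pooling_num : Int) : Prop := 0 ≤ pooling_num
instance (height : Int) (width : Int) (pooling_num : Int) : Decidable (Pre_get_vgg_output_length height width pooling_num) := by unfold Pre_get_vgg_output_length; infer_instance
def pvWitness_get_vgg_output_length : Int × Int × Int := (8, 8, 2)
def Spec_get_vgg_output_length (height : Int) (width : Int) (pooling_num : Int) (out : Int × Int) : Prop := out = get_vgg_output_length_alt height width pooling_num
instance (height : Int) (width : Int) (pooling_num : Int) (out : Int × Int) : Decidable (Spec_get_vgg_output_length height width pooling_num out) := by unfold Spec_get_vgg_output_length; infer_instance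

-- ===== CLAIM =====
def Claim_equal_get_vgg_output_length : Prop := ∀ (height : Int) (width : Int) (pooling_num : Int), Dom_get_vgg_output_length height width pooling_num → Pre_get_vgg_output_length height width pooling_num → Spec_get_vgg_output_length height width pooling_num (get_vgg_output_length height width pooling_num)

-- ===== LEMMAS AND PROOFS =====

-- A's loop with n ≤ 4 iterations computes floor(L / 2^n)
lemma pv_loop_unroll (L : Int) (n : Nat) (hn : n ≤ 4) :
    (PySem.List.pyRange 0 ((n : Int)) 1).foldl
      (fun L i =>
        PySem.Int.floordiv (L + 2 * PySem.List.pyGetD ([0, 0, 0, 0] : List Int) i 0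
          - PySem.List.pyGetD ([2, 2, 2, 2] : List Int) i 0) 2 + 1) L
    = PySem.Int.floordiv L (2 ^ n) := by
  interval_cases n
  · rw [show PySem.List.pyRange 0 (((0 : Nat) : Int)) 1 = [] from by decide]
    simp [PySem.Int.floordiv]
  · rw [show PySem.List.pyRange 0 (((1 : Nat) : Int)) 1 = [0] from by decide]
    simp [List.foldl, PySem.List.pyGetD, PySem.List.pyGet?, PySem.List.pyIdx?]
    omega
  · rw [show PySem.List.pyRange 0 (((2 : Nat) : Int)) 1 = [0, 1] from by decide]
    simp [List.foldl, PySem.List.pyGetD, PySem.List.pyGet?, PySem.List.pyIdx?]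
    omega
  · rw [show PySem.List.pyRange 0 (((3 : Nat) : Int)) 1 = [0, 1, 2] from by decide]
    simp [List.foldl, PySem.List.pyGetD, PySem.List.pyGet?, PySem.List.pyIdx?]
    omega
  · rw [show PySem.List.pyRange 0 (((4 : Nat) : Int)) 1 = [0, 1, 2, 3] from by decide]
    simp [List.foldl, PySem.List.pyGetD, PySem.List.pyGet?, PySem.List.pyIdx?]
    omega

-- for 0 ≤ p, length of [2,2,2,2][:p] equals B's pooling count min p 4
lemma pv_slice_len (p : Int) (hp : 0 ≤ p) :
    ((PySem.List.slice ([2, 2, 2, 2] : List Int) none (some p)).length)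
      = (min p 4).toNat := by
  obtain ⟨k, rfl⟩ : ∃ k : Nat, p = (k : Int) := ⟨p.toNat, by omega⟩
  rw [PySem.List.slice_to_natCast]
  simp only [List.length_take, List.length_cons, List.length_nil]
  omega

-- ===== VERDICT =====
theorem get_vgg_output_length_spec : Claim_equal_get_vgg_output_length := by
  intro height width pooling_num _ hpre
  unfold Spec_get_vgg_output_length get_vgg_output_length get_vgg_output_length_alt
  have hlen := pv_slice_len pooling_num hpre
  simp only [hlen]
  rw [pv_loop_unroll height _ (by omega : (min pooling_num 4).toNat ≤ 4),
      pv_loop_unroll width _ (by omega : (min pooling_num 4).toNat ≤ 4)]
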